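-- pv_equiv track=rewrite | github.com/mattclarke/advent_of_code_18 | day_15/day_15.py | gross_possibles
-- ===== SOURCE A (Python) =====
-- def gross_possibles(elves, goblins, grid, is_elves):
--     enemy = goblins if is_elves else elves
--
--     possible_spaces = set()
--     for pos, g in enemy.items():
--         for x, y in [(-1, 0), (0, -1), (1, 0), (0, 1)]:
--             npos = (pos[0] + x, pos[1] + y)
--             if npos[0] >= len(grid[0]) or npos[0] <= 0:
--                 continue
--             if npos[1] >= len(grid) or npos[1] <= 0:
--                 continue
--             if grid[npos[1]][npos[0]] == "#":
--                 continue
--             if npos in elves or npos in goblins: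
--                 continue
--             possible_spaces.add(npos)
--     return possible_spaces
-- ===== SOURCE B (Python) =====
-- def gross_possibles(elves, goblins, grid, is_elves):
--     enemy = goblins if is_elves else elves
--     width = len(grid[0])
--     occupied = set(elves) | set(goblins)
--     # One scan over the whole grid builds the table of open cells; adjacency to an
--     # enemy is then a single membership test per neighbour.
--     open_cells = {(x, y)
--                   for y, row in enumerate(grid)
--                   for x, cell in enumerate(row)
--                   if 0 < x < width and 0 < y and cell != "#"} - occupied
--     return {n for ex, ey in enemy
--             for n in ((ex - 1, ey), (ex, ey - 1), (ex + 1, ey), (ex, ey + 1))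
--             if n in open_cells}
-- ===== Notes on version B (the rewrite author's own statement) =====
-- stated objective: alternative
-- what changed: B scans the whole grid once to precompute the set of open cells (in-bounds, non-wall, unoccupied), so the per-neighbour guard chain of A (grid indexing, bounds tests, two dict-membership scans) collapses to one membership test in that table; the adjacency relation is symmetric so the resulting set is the same.
-- outside the precondition, e.g. on gross_possibles({}, {}, [], True): A returns set(), B raises IndexError
import Mathlib
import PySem

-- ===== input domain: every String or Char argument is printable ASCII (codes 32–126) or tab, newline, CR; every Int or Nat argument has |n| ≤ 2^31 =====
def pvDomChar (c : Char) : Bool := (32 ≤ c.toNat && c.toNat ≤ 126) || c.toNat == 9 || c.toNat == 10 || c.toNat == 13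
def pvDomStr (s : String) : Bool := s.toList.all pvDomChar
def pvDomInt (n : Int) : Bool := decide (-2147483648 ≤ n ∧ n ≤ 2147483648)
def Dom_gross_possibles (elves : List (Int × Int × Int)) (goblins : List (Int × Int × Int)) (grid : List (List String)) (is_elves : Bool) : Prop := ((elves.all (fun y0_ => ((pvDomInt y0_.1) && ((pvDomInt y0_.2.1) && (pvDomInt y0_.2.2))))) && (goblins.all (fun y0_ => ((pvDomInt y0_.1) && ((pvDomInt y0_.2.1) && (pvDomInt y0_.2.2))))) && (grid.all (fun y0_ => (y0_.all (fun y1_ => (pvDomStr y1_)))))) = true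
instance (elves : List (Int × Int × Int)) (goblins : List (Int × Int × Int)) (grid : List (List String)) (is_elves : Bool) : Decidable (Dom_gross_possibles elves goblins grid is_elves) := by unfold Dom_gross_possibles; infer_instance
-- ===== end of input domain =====

-- B precomputes in one grid scan the set of open cells (in-bounds, non-wall, unoccupied) and then keeps each enemy
-- neighbour by a single membership test in that table, replacing A's per-neighbour guard chain (objective: alternative).


-- ===== PORT A =====
-- 'npos in elves' (dict-key membership; a dict is ported as a triple list (x, y, hp) with key (x, y))
def pvKeyMem (d : List (Int × Int × Int)) (c : Int × Int) : Bool := d.any (fun t => (t.1, t.2.1) == c)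

-- grid[y][x] and grid[0] are ported with the total PySem.List.pyGetD; exact under Pre_ (grid nonempty, indexed rows long enough)
def gross_possibles (elves : List (Int × Int × Int)) (goblins : List (Int × Int × Int)) (grid : List (List String)) (is_elves : Bool) : List (Int × Int) :=
  let enemy := if is_elves then goblins else elves
  enemy.foldl (fun ps t =>
    [((-1 : Int), (0 : Int)), (0, -1), (1, 0), (0, 1)].foldl (fun ps d =>
      let npos : Int × Int := (t.1 + d.1, t.2.1 + d.2)
      if ((PySem.List.pyGetD grid 0 []).length : Int) ≤ npos.1 ∨ npos.1 ≤ 0 then ps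
      else if (grid.length : Int) ≤ npos.2 ∨ npos.2 ≤ 0 then ps
      else if PySem.List.pyGetD (PySem.List.pyGetD grid npos.2 []) npos.1 "" == "#" then ps
      else if pvKeyMem elves npos || pvKeyMem goblins npos then ps
      else PySem.Set.add ps npos) ps) []

-- ===== PORT B =====
-- set(d) on a dict = its key set
def pvKeys (d : List (Int × Int × Int)) : List (Int × Int) := d.map (fun t => (t.1, t.2.1))

-- occupied = set(elves) | set(goblins)
def pvOccupied (elves : List (Int × Int × Int)) (goblins : List (Int × Int × Int)) : PySem.Set (Int × Int) :=
  PySem.Set.union (PySem.Set.ofList (pvKeys elves)) (pvKeys goblins)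

-- the open_cells set comprehension: one scan over the whole grid (enumerate over rows, enumerate over cells)
def pvOpenCells (elves : List (Int × Int × Int)) (goblins : List (Int × Int × Int)) (grid : List (List String)) : PySem.Set (Int × Int) :=
  PySem.Set.diff
    (PySem.Set.ofList ((PySem.List.enumerate grid).flatMap (fun yr =>
      ((PySem.List.enumerate yr.2).filter (fun xc =>
        decide (0 < xc.1) && decide (xc.1 < ((PySem.List.pyGetD grid 0 []).length : Int)) &&
        decide (0 < yr.1) && !(xc.2 == "#"))).map (fun xc => (xc.1, yr.1)))))
    (pvOccupied elves goblins)

def gross_possibles_alt (elves : List (Int × Int × Int)) (goblins : List (Int × Int × Int)) (grid : List (List String)) (is_elves : Bool) : List (Int × Int) :=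
  let enemy := if is_elves then goblins else elves
  let openCells := pvOpenCells elves goblins grid
  PySem.Set.ofList ((enemy.flatMap (fun t => [(t.1 - 1, t.2.1), (t.1, t.2.1 - 1), (t.1 + 1, t.2.1), (t.1, t.2.1 + 1)])).filter
    (fun n => PySem.Set.contains openCells n))

-- ===== PRECONDITION & SPEC =====
-- Pre_ excludes the inputs on which a grid access raises IndexError in A (some in-bounds enemy neighbour lies on a row
-- shorter than row 0), plus the empty grid, where A still returns set() when the enemy dict is empty while B's up-front
-- len(grid[0]) raises IndexError.
def Pre_gross_possibles (elves : List (Int × Int × Int)) (goblins : List (Int × Int × Int)) (grid : List (List String)) (is_elves : Bool) : Prop :=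
  grid ≠ [] ∧
  ∀ t ∈ (if is_elves then goblins else elves),
    ∀ d ∈ [((-1 : Int), (0 : Int)), (0, -1), (1, 0), (0, 1)],
      (0 < t.1 + d.1 ∧ t.1 + d.1 < ((grid.headD []).length : Int) ∧
       0 < t.2.1 + d.2 ∧ t.2.1 + d.2 < (grid.length : Int)) →
      t.1 + d.1 < ((PySem.List.pyGetD grid (t.2.1 + d.2) []).length : Int)
instance (elves : List (Int × Int × Int)) (goblins : List (Int × Int × Int)) (grid : List (List String)) (is_elves : Bool) : Decidable (Pre_gross_possibles elves goblins grid is_elves) := by unfold Pre_gross_possibles; infer_instance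

def pvWitness_gross_possibles : (List (Int × Int × Int)) × (List (Int × Int × Int)) × List (List String) × Bool :=
  ([(1, 1, 200)], [(2, 2, 200)], [["#", "#", "#", "#"], ["#", ".", ".", "#"], ["#", ".", ".", "#"], ["#", "#", "#", "#"]], true)

def Spec_gross_possibles (elves : List (Int × Int × Int)) (goblins : List (Int × Int × Int)) (grid : List (List String)) (is_elves : Bool) (out : List (Int × Int)) : Prop := out = gross_possibles_alt elves goblins grid is_elves
instance (elves : List (Int × Int × Int)) (goblins : List (Int × Int × Int)) (grid : List (List String)) (is_elves : Bool) (out : List (Int × Int)) : Decidable (Spec_gross_possibles elves goblins grid is_elves out) := by unfold Spec_gross_possibles; infer_instance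

-- ===== CLAIM (what is proved, stated in full; the proofs are below) =====
def Claim_equal_gross_possibles : Prop := ∀ (elves : List (Int × Int × Int)) (goblins : List (Int × Int × Int)) (grid : List (List String)) (is_elves : Bool), Dom_gross_possibles elves goblins grid is_elves → Pre_gross_possibles elves goblins grid is_elves → Spec_gross_possibles elves goblins grid is_elves (gross_possibles elves goblins grid is_elves)

-- ===== LEMMAS AND PROOFS =====

-- the guard conjunction A tests on a candidate cell, as one boolean
def pvGuard (elves : List (Int × Int × Int)) (goblins : List (Int × Int × Int)) (grid : List (List String)) (c : Int × Int) : Bool :=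
  decide (0 < c.1) && decide (c.1 < ((PySem.List.pyGetD grid 0 []).length : Int)) &&
  decide (0 < c.2) && decide (c.2 < (grid.length : Int)) &&
  !(PySem.List.pyGetD (PySem.List.pyGetD grid c.2 []) c.1 "" == "#") &&
  !(pvKeyMem elves c || pvKeyMem goblins c)

-- under the row-length condition of Pre_ at c, membership in B's precomputed open-cell table is exactly A's guard chain
theorem pvOpenCells_contains (elves goblins : List (Int × Int × Int)) (grid : List (List String)) (c : Int × Int)
    (hrow : (0 < c.1 ∧ c.1 < ((PySem.List.pyGetD grid 0 []).length : Int) ∧ 0 < c.2 ∧ c.2 < (grid.length : Int)) →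
      c.1 < ((PySem.List.pyGetD grid c.2 []).length : Int)) :
    PySem.Set.contains (pvOpenCells elves goblins grid) c = pvGuard elves goblins grid c := by
  rw [Bool.eq_iff_iff, PySem.Set.contains_iff]
  unfold pvOpenCells pvGuard
  rw [PySem.Set.mem_diff, PySem.Set.mem_ofList]
  have hocc : (c ∈ pvOccupied elves goblins) ↔ (pvKeyMem elves c || pvKeyMem goblins c) = true := by
    simp [pvOccupied, PySem.Set.mem_union, PySem.Set.mem_ofList, pvKeys, pvKeyMem]
  simp only [List.mem_flatMap, List.mem_map, List.mem_filter,
    PySem.List.mem_enumerate_iff, Bool.and_eq_true, decide_eq_true_eq, Bool.not_eq_eq_eq_not,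
    Bool.not_true, beq_eq_false_iff_ne, Bool.or_eq_true, hocc]
  constructor
  · rintro ⟨⟨yr, ⟨k, hk, hyr⟩, xc, ⟨⟨j, hj, hxc⟩, hrest⟩, hc⟩, hno⟩
    subst hyr hxc hc
    simp only [zero_add] at *
    have hg : PySem.List.pyGetD grid ((k : Int)) [] = grid[k] := by
      simp [PySem.List.pyGetD_natCast, hk]
    have hj' : j < grid[k].length := by simpa using hj
    have hr : PySem.List.pyGetD grid[k] ((j : Int)) "" = grid[k][j] := by
      simp [PySem.List.pyGetD_natCast, hj']
    rw [hg, hr]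
    refine ⟨⟨⟨hrest.1, by exact_mod_cast hk⟩, hrest.2⟩, ?_⟩
    simpa using hno
  · rintro ⟨⟨⟨⟨⟨hx0, hxw⟩, hy0⟩, hyh⟩, hcell⟩, hnocc⟩
    have hrow' := hrow ⟨hx0, hxw, hy0, hyh⟩
    have hk : c.2.toNat < grid.length := by omega
    have hg : PySem.List.pyGetD grid c.2 [] = grid[c.2.toNat] := by
      apply PySem.List.pyGetD_eq_getElem <;> omega
    have hj : c.1.toNat < grid[c.2.toNat].length := by
      rw [hg] at hrow'; omega
    have hr : PySem.List.pyGetD (PySem.List.pyGetD grid c.2 []) c.1 "" = grid[c.2.toNat][c.1.toNat] := by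
      rw [hg]
      apply PySem.List.pyGetD_eq_getElem <;> omega
    refine ⟨⟨(c.2, grid[c.2.toNat]), ⟨c.2.toNat, hk, by simp; omega⟩,
      (c.1, grid[c.2.toNat][c.1.toNat]), ⟨⟨c.1.toNat, by simpa using hj, by simp; omega⟩,
        ⟨⟨hx0, hxw⟩, hy0⟩, by rw [hr] at hcell; simpa using hcell⟩, by simp⟩, ?_⟩
    simp_all

-- A's continue-guard chain is 'if the cell is in the open table then add it else skip'
theorem pvBranch_eq (elves goblins : List (Int × Int × Int)) (grid : List (List String))
    (ps : PySem.Set (Int × Int)) (c : Int × Int) :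
    (if ((PySem.List.pyGetD grid 0 []).length : Int) ≤ c.1 ∨ c.1 ≤ 0 then ps
     else if (grid.length : Int) ≤ c.2 ∨ c.2 ≤ 0 then ps
     else if PySem.List.pyGetD (PySem.List.pyGetD grid c.2 []) c.1 "" == "#" then ps
     else if pvKeyMem elves c || pvKeyMem goblins c then ps
     else PySem.Set.add ps c)
      = (if pvGuard elves goblins grid c then PySem.Set.add ps c else ps) := by
  rw [pvGuard]
  by_cases h1 : ((PySem.List.pyGetD grid 0 []).length : Int) ≤ c.1 ∨ c.1 ≤ 0 <;>
  by_cases h2 : (grid.length : Int) ≤ c.2 ∨ c.2 ≤ 0 <;>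
  cases h3 : (PySem.List.pyGetD (PySem.List.pyGetD grid c.2 []) c.1 "" == "#") <;>
  cases h4 : (pvKeyMem elves c || pvKeyMem goblins c) <;>
  simp [h1, h2, h3, h4] <;> omega

-- a fold of conditional set-inserts is the fold of plain inserts over the filtered list
theorem pvFoldl_condAdd {α : Type} [BEq α] (p : α → Bool) (l : List α) (s : PySem.Set α) :
    l.foldl (fun ps c => if p c then PySem.Set.add ps c else ps) s
      = (l.filter p).foldl PySem.Set.add s := by
  induction l generalizing s with
  | nil => rfl
  | cons x xs ih =>
    simp only [List.foldl_cons, List.filter_cons]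
    cases h : p x <;> simp [ih]

theorem pvFoldl_add_flatMap {α β : Type} [BEq β] (f : α → List β) (l : List α) (s : PySem.Set β) :
    (l.flatMap f).foldl PySem.Set.add s = l.foldl (fun s e => (f e).foldl PySem.Set.add s) s := by
  induction l generalizing s with
  | nil => rfl
  | cons x xs ih => simp [List.flatMap_cons, List.foldl_append, ih]

theorem pvMain (elves goblins : List (Int × Int × Int)) (grid : List (List String)) (is_elves : Bool)
    (hpre : Pre_gross_possibles elves goblins grid is_elves) :
    gross_possibles elves goblins grid is_elves = gross_possibles_alt elves goblins grid is_elves := by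
  obtain ⟨hne, hrows⟩ := hpre
  rw [gross_possibles, gross_possibles_alt]
  have hfilter : ∀ (enemy : List (Int × Int × Int)), enemy = (if is_elves then goblins else elves) →
      (enemy.flatMap (fun t => [(t.1 - 1, t.2.1), (t.1, t.2.1 - 1), (t.1 + 1, t.2.1), (t.1, t.2.1 + 1)])).filter
        (fun n => PySem.Set.contains (pvOpenCells elves goblins grid) n)
      = (enemy.flatMap (fun t => [(t.1 - 1, t.2.1), (t.1, t.2.1 - 1), (t.1 + 1, t.2.1), (t.1, t.2.1 + 1)])).filter
        (pvGuard elves goblins grid) := by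
    intro enemy henemy
    apply List.filter_congr
    intro n hn
    rw [List.mem_flatMap] at hn
    obtain ⟨t, ht, hnmem⟩ := hn
    have hrow : (0 < n.1 ∧ n.1 < ((PySem.List.pyGetD grid 0 []).length : Int) ∧ 0 < n.2 ∧ n.2 < (grid.length : Int)) →
        n.1 < ((PySem.List.pyGetD grid n.2 []).length : Int) := by
      have hgetD0 : PySem.List.pyGetD grid 0 [] = grid.headD [] := by
        cases grid with
        | nil => simp at hne
        | cons r rs => simp [PySem.List.pyGetD, PySem.List.pyGet?, PySem.List.pyIdx?]
      rw [← henemy] at hrows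
      have step : ∀ dx dy : Int, (dx, dy) ∈ [((-1 : Int), (0 : Int)), (0, -1), (1, 0), (0, 1)] →
          n = (t.1 + dx, t.2.1 + dy) →
          (0 < n.1 ∧ n.1 < ((PySem.List.pyGetD grid 0 []).length : Int) ∧ 0 < n.2 ∧ n.2 < (grid.length : Int)) →
          n.1 < ((PySem.List.pyGetD grid n.2 []).length : Int) := by
        intro dx dy hd hn h
        subst hn
        rw [hgetD0] at h
        exact hrows t ht (dx, dy) hd ⟨h.1, h.2.1, h.2.2.1, h.2.2.2⟩
      fin_cases hnmem
      · exact step (-1) 0 (by simp) (by simp [Prod.ext_iff]; try omega)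
      · exact step 0 (-1) (by simp) (by simp [Prod.ext_iff]; try omega)
      · exact step 1 0 (by simp) (by simp [Prod.ext_iff]; try omega)
      · exact step 0 1 (by simp) (by simp [Prod.ext_iff]; try omega)
    exact pvOpenCells_contains elves goblins grid n hrow
  rw [hfilter _ rfl, PySem.Set.ofList_eq_foldl, List.filter_flatMap, pvFoldl_add_flatMap]
  congr 1
  funext ps t
  have hcand : [(t.1 - 1, t.2.1), (t.1, t.2.1 - 1), (t.1 + 1, t.2.1), (t.1, t.2.1 + 1)]
      = [((-1 : Int), (0 : Int)), (0, -1), (1, 0), (0, 1)].map (fun d => (t.1 + d.1, t.2.1 + d.2)) := by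
    simp [Prod.ext_iff]; try omega
  conv_rhs => rw [hcand, ← pvFoldl_condAdd, List.foldl_map]
  apply List.foldl_ext
  intro s d _
  exact pvBranch_eq elves goblins grid s (t.1 + d.1, t.2.1 + d.2)

-- ===== VERDICT (by name: the statement is the Claim_ definition above) =====
theorem gross_possibles_spec : Claim_equal_gross_possibles := by
  intro elves goblins grid is_elves _ hpre
  unfold Spec_gross_possibles
  exact pvMain elves goblins grid is_elves hpre
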